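-- pv_equiv track=rewrite | github.com/eyan73/crimtech-comp-f20 | python/rm_smallest.py | rm_smallest
-- ===== SOURCE A (Python) =====
-- def rm_smallest(d):
--     if not bool(d):
--         return d
--     l = []
--     for i in d:
--         value = d.get(i)
--         l.append(value)
--     minval = min(l)
--     for i in d:
--         if d.get(i) == minval:
--             minkey = i
--             break
--     d.pop(minkey)
--     return d
-- ===== SOURCE B (Python) =====
-- def rm_smallest(d):
--     if not bool(d):
--         return d
--     d.pop(min(d, key=d.get))
--     return d
-- ===== Notes on version B (the rewrite author's own statement) =====
-- stated objective: simpler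
-- what changed: Replaces A's three passes (build the value list, take its min, rescan the keys for the first key with that value) with a single argmin min(d, key=d.get) whose key is then popped.
import Mathlib
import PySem

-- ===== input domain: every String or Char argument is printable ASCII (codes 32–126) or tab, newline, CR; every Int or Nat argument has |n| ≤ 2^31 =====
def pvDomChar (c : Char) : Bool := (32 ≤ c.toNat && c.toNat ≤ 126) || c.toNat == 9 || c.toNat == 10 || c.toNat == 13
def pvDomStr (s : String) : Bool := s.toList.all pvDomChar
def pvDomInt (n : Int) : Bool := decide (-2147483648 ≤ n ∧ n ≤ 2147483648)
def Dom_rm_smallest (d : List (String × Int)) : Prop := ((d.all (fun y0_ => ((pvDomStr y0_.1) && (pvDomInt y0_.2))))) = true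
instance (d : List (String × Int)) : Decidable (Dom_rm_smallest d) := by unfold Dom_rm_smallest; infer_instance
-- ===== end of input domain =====

-- B replaces A's three passes (value list, min, rescan for the matching key) by a single
-- argmin `min(d, key=d.get)`; objective: simpler. Both A and B pop the key from the dict
-- in place; the equivalence proved here is about the return value.

-- ===== PORT A =====
def rm_smallest (d : List (String × Int)) : List (String × Int) :=
  if d = [] then d
  else
    let dd := PySem.Dict.mk d
    -- for i in d: l.append(d.get(i)) — i is always a key of d, so d.get(i) is its value (getD is exact here)
    let l := dd.keys.foldl (fun acc i => acc ++ [dd.getD i 0]) []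
    match PySem.List.min? l (fun x => x) with
    | none => d  -- unreachable totality guard: d ≠ [] so l ≠ []
    | some minval =>
      match dd.keys.find? (fun i => dd.getD i 0 == minval) with
      | none => d  -- unreachable totality guard: minval is one of the values
      | some minkey => (dd.erase minkey).items

-- ===== PORT B =====
def rm_smallest_alt (d : List (String × Int)) : List (String × Int) :=
  if d = [] then d
  else
    let dd := PySem.Dict.mk d
    match PySem.List.min? dd.keys (fun i => dd.getD i 0) with
    | none => d  -- unreachable totality guard: d ≠ [] so keys ≠ []
    | some k => (dd.erase k).items

-- ===== PRECONDITION & SPEC =====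
def Spec_rm_smallest (d : List (String × Int)) (out : List (String × Int)) : Prop := out = rm_smallest_alt d
instance (d : List (String × Int)) (out : List (String × Int)) : Decidable (Spec_rm_smallest d out) := by unfold Spec_rm_smallest; infer_instance

-- ===== CLAIM (what is proved, stated in full; the proofs are below) =====
def Claim_equal_rm_smallest : Prop := ∀ (d : List (String × Int)), Dom_rm_smallest d → Spec_rm_smallest d (rm_smallest d)

-- ===== LEMMAS AND PROOFS =====

theorem pv_min?_cons_cons {α : Type} (f : α → Int) (a x : α) (t : List α) :
    PySem.List.min? (a :: x :: t) f = PySem.List.min? ((if f x < f a then x else a) :: t) f := by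
  simp only [PySem.List.min?, List.foldl_cons, apply_ite (fun y : α => some y)]

theorem pv_min?_singleton {α : Type} (f : α → Int) (a : α) :
    PySem.List.min? [a] f = some a := by
  simp [PySem.List.min?]

-- min over the mapped values is the map of the keyed min
theorem pv_min?_map {α : Type} (f : α → Int) (t : List α) : ∀ a : α,
    PySem.List.min? (f a :: t.map f) (fun v => v) = Option.map f (PySem.List.min? (a :: t) f) := by
  induction t with
  | nil => intro a; simp [pv_min?_singleton]
  | cons x t ih =>
    intro a
    have h1 : PySem.List.min? (f a :: f x :: t.map f) (fun v => v)
        = PySem.List.min? (f (if f x < f a then x else a) :: t.map f) (fun v => v) := by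
      rw [pv_min?_cons_cons (fun v => v) (f a) (f x) (t.map f)]
      simp only [apply_ite f]
    simp only [List.map_cons]
    rw [h1, ih, pv_min?_cons_cons]

-- min? of a nonempty list is some
theorem pv_min?_some {α : Type} (f : α → Int) (t : List α) : ∀ a : α,
    ∃ r, PySem.List.min? (a :: t) f = some r := by
  induction t with
  | nil => intro a; exact ⟨a, pv_min?_singleton f a⟩
  | cons x t ih =>
    intro a
    rw [pv_min?_cons_cons]
    exact ih _

-- the keyed min of a :: t either is a (then a is minimal in t) or is the FIRST element
-- of t whose key is strictly below f a
theorem pv_min_run {α : Type} (f : α → Int) (t : List α) : ∀ (a r : α),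
    PySem.List.min? (a :: t) f = some r →
    (r = a ∧ ∀ y ∈ t, f a ≤ f y) ∨ (f r < f a ∧ t.find? (fun i => f i == f r) = some r) := by
  induction t with
  | nil =>
    intro a r h
    rw [pv_min?_singleton] at h
    left
    simp [(Option.some.injEq .. ▸ h : a = r).symm]
  | cons x t ih =>
    intro a r h
    rw [pv_min?_cons_cons] at h
    by_cases hx : f x < f a
    · rw [if_pos hx] at h
      rcases ih x r h with ⟨hr, hmin⟩ | ⟨hlt, hfind⟩
      · right
        refine ⟨by rw [hr]; exact hx, ?_⟩
        rw [List.find?_cons_of_pos (by simp [hr]), hr]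
      · right
        refine ⟨lt_trans hlt hx, ?_⟩
        rw [List.find?_cons_of_neg (by simp; omega), hfind]
    · rw [if_neg hx] at h
      rcases ih a r h with ⟨hr, hmin⟩ | ⟨hlt, hfind⟩
      · left
        refine ⟨hr, ?_⟩
        intro y hy
        rcases List.mem_cons.mp hy with rfl | hy
        · omega
        · exact hmin y hy
      · right
        refine ⟨hlt, ?_⟩
        rw [List.find?_cons_of_neg (by simp; omega), hfind]

-- the first key whose value equals the minimum value IS the keyed argmin
theorem pv_find_argmin {α : Type} (f : α → Int) (x : α) (t : List α) (k : α)
    (h : PySem.List.min? (x :: t) f = some k) :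
    (x :: t).find? (fun i => f i == f k) = some k := by
  rcases pv_min_run f t x k h with ⟨hk, _⟩ | ⟨hlt, hfind⟩
  · rw [List.find?_cons_of_pos (by simp [hk]), hk]
  · rw [List.find?_cons_of_neg (by simp; omega), hfind]

-- ===== VERDICT (by name: the statement is the Claim_ definition above) =====
theorem rm_smallest_spec : Claim_equal_rm_smallest := by
  intro d _
  unfold Spec_rm_smallest rm_smallest rm_smallest_alt
  by_cases hd : d = []
  · simp [hd]
  · simp only [if_neg hd]
    set dd := PySem.Dict.mk d with hdd
    set f : String → Int := fun i => dd.getD i 0 with hf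
    have hkeys : dd.keys ≠ [] := by
      intro h
      apply hd
      have : dd.items.map Prod.fst = [] := h
      cases hitems : dd.items with
      | nil => exact hitems
      | cons p t => rw [hitems] at this; simp at this
    have hl : dd.keys.foldl (fun acc i => acc ++ [dd.getD i 0]) [] = dd.keys.map f := by
      simpa using PySem.List.foldl_append_singleton_eq_map (l := dd.keys) (f := f) (acc := [])
    cases hks : dd.keys with
    | nil => exact absurd hks hkeys
    | cons x t =>
      rw [hks] at hl
      obtain ⟨k, hk⟩ := pv_min?_some f t x
      have hmap : PySem.List.min? ((x :: t).map f) (fun v => v) = some (f k) := by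
        rw [List.map_cons, pv_min?_map, hk]; rfl
      have hfind : List.find? (fun i => dd.getD i 0 == f k) (x :: t) = some k :=
        pv_find_argmin f x t k hk
      rw [hl, hmap, hk]
      simp only [hfind]
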